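-- pv_equiv track=rewrite | github.com/akeanti/Advent-of-code-2025 | Day_07/Part 2/solution.py | solve_part2_quantum
-- ===== SOURCE A (Python) =====
-- from collections import defaultdict
--
-- def solve_part2_quantum(input_str):
--     grid = input_str.strip().split('\n')
--     height = len(grid)
--     width = len(grid[0])
--
--     current_counts = defaultdict(int)
--
--     for c in range(width):
--         if grid[0][c] == 'S':
--             current_counts[c] = 1
--             break
--
--     for r in range(height):
--         next_counts = defaultdict(int)
--
--         if not current_counts:
--             break
--
--         for c, count in current_counts.items():
--             # Vérification des bornes (sécurité)
--             if not (0 <= c < width):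
--                 continue
--
--             char = grid[r][c]
--
--             if char == '^':
--
--                 if c - 1 >= 0:
--                     next_counts[c - 1] += count
--                 if c + 1 < width:
--                     next_counts[c + 1] += count
--
--             elif char == 'S' or char == '.':
--                 next_counts[c] += count
--
--
--         current_counts = next_counts
--
--     return sum(current_counts.values())
-- ===== SOURCE B (Python) =====
-- def solve_part2_quantum(input_str):
--     grid = input_str.strip().split('\n')
--     width = len(grid[0])
--     start = next((c for c in range(width) if grid[0][c] == 'S'), None)
--     if start is None:
--         return 0
--     # bottom-up DP: ways[c] = number of paths from (r, c) to below the grid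
--     ways = [1] * width
--     for row in reversed(grid):
--         new = []
--         for c in range(width):
--             ch = row[c]
--             if ch == '^':
--                 v = (ways[c - 1] if c - 1 >= 0 else 0) + (ways[c + 1] if c + 1 < width else 0)
--             elif ch == 'S' or ch == '.':
--                 v = ways[c]
--             else:
--                 v = 0
--             new.append(v)
--         ways = new
--     return ways[start]
-- ===== Notes on version B (the rewrite author's own statement) =====
-- stated objective: alternative
-- what changed: A pushes a sparse frontier dict of per-column path counts forward row by row; B computes the same count by a bottom-up dense DP (ways-to-exit per column, from the last row upward) and reads off the entry at the start cell of row 0.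
-- outside the precondition, e.g. on solve_part2_quantum('S.\nX'): A returns 0, B raises IndexError
import Mathlib
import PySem

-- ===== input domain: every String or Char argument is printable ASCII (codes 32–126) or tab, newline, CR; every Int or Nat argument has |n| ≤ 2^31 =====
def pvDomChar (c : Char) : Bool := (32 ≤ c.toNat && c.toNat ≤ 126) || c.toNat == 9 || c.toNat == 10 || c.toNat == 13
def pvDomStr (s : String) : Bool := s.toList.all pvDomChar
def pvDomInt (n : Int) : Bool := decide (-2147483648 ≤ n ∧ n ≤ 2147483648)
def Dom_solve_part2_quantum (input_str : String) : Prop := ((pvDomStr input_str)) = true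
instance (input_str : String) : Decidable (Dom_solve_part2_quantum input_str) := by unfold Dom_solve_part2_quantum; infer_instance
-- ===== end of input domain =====

-- B replaces A's forward sparse-frontier dict propagation by a bottom-up dense DP
-- (ways-to-exit per column, computed from the last row upward); objective: alternative.

-- ===== PORT A =====
-- A's first loop: scan row 0 left to right, put count 1 at the first start marker and stop.
def pvInitA (row : List Char) (c : Int) : PySem.Dict Int Int :=
  match row with
  | [] => PySem.Dict.empty
  | ch :: rest => if ch = 'S' then PySem.Dict.empty.insert c 1 else pvInitA rest (c + 1)

-- body of A's inner 'for c, count in current_counts.items()' loop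
def pvStepA (row : List Char) (width : Int) (nxt : PySem.Dict Int Int) (p : Int × Int) :
    PySem.Dict Int Int :=
  let c := p.1
  let k := p.2
  if 0 ≤ c ∧ c < width then
    let ch := PySem.List.pyGetD row c ' '
    if ch = '^' then
      let nxt1 := if 0 ≤ c - 1 then nxt.modify (c - 1) 0 (· + k) else nxt
      if c + 1 < width then nxt1.modify (c + 1) 0 (· + k) else nxt1
    else if ch = 'S' ∨ ch = '.' then nxt.modify c 0 (· + k)
    else nxt
  else nxt

-- A's outer 'for r in range(height)' loop with its 'if not current_counts: break'
def pvRowsA (rows : List (List Char)) (width : Int) (cur : PySem.Dict Int Int) :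
    PySem.Dict Int Int :=
  match rows with
  | [] => cur
  | row :: rest =>
    if cur.items = [] then cur
    else pvRowsA rest width (cur.items.foldl (pvStepA row width) PySem.Dict.empty)

def solve_part2_quantum (input_str : String) : Int :=
  let grid := PySem.Chars.splitOn (PySem.Chars.strip input_str.toList) ['\n']
  let width : Int := ((grid.headD []).length : Int)
  let cur := pvInitA (grid.headD []) 0
  ((pvRowsA grid width cur).values).sum

-- ===== PORT B =====
-- B's next(...) search for the first start marker in row 0
def pvFindS (row : List Char) (c : Nat) : Option Nat :=
  match row with
  | [] => none
  | ch :: rest => if ch = 'S' then some c else pvFindS rest (c + 1)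

-- one backward DP step: new ways row computed from the row below
def pvRowB (row : List Char) (width : Nat) (ways : List Int) : List Int :=
  (List.range width).map (fun c =>
    let ch := row.getD c ' '
    if ch = '^' then
      (if 1 ≤ c then ways.getD (c - 1) 0 else 0) +
        (if c + 1 < width then ways.getD (c + 1) 0 else 0)
    else if ch = 'S' ∨ ch = '.' then ways.getD c 0
    else 0)

def solve_part2_quantum_alt (input_str : String) : Int :=
  let grid := PySem.Chars.splitOn (PySem.Chars.strip input_str.toList) ['\n']
  let row0 := grid.headD []
  let width := row0.length
  match pvFindS row0 0 with
  | none => 0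
  | some start =>
    (grid.reverse.foldl (fun ways row => pvRowB row width ways)
      (List.replicate width 1)).getD start 0

-- ===== PRECONDITION & SPEC =====
-- Pre_ excludes ragged grids whose first line contains the start marker S: there A may hit
-- a too-short line and raise IndexError (and B's dense DP reads every line up to width, so
-- it raises on some such inputs where A's sparse frontier happens to die first and A returns 0).
def Pre_solve_part2_quantum (input_str : String) : Prop :=
  let grid := PySem.Chars.splitOn (PySem.Chars.strip input_str.toList) ['\n']
  'S' ∉ grid.headD [] ∨ ∀ row ∈ grid, (grid.headD []).length ≤ row.length
instance (input_str : String) : Decidable (Pre_solve_part2_quantum input_str) := by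
  unfold Pre_solve_part2_quantum; infer_instance

def pvWitness_solve_part2_quantum : String := "S.\n^."

def Spec_solve_part2_quantum (input_str : String) (out : Int) : Prop :=
  out = solve_part2_quantum_alt input_str
instance (input_str : String) (out : Int) : Decidable (Spec_solve_part2_quantum input_str out) := by
  unfold Spec_solve_part2_quantum; infer_instance

-- ===== CLAIM (what is proved, stated in full; the proofs are below) =====
def Claim_equal_solve_part2_quantum : Prop :=
  ∀ (input_str : String), Dom_solve_part2_quantum input_str →
    Pre_solve_part2_quantum input_str →
    Spec_solve_part2_quantum input_str (solve_part2_quantum input_str)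

-- ===== LEMMAS AND PROOFS =====

-- the backward table B builds: ways row for the suffix 'rows' of the grid
def pvW (w : Nat) (rows : List (List Char)) : List Int :=
  rows.foldr (fun row ways => pvRowB row w ways) (List.replicate w 1)

-- read a ways row at an Int column
def pvG (ways : List Int) : Int → Int := fun x => ways.getD x.toNat 0

-- invariant of A's frontier dict: distinct keys, all in [0, w)
def pvInv (w : Nat) (d : PySem.Dict Int Int) : Prop :=
  d.keys.Nodup ∧ ∀ k ∈ d.keys, 0 ≤ k ∧ k < (w : Int)

-- weighted sum of a frontier against a column valuation, over all columns
def pvPhi (w : Nat) (d : PySem.Dict Int Int) (g : Int → Int) : Int :=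
  ∑ c ∈ Finset.range w, d.getD (c : Int) 0 * g (c : Int)

-- the contribution of one frontier item to the next row's weighted sum
def pvContrib (row : List Char) (w : Nat) (g : Int → Int) (p : Int × Int) : Int :=
  if 0 ≤ p.1 ∧ p.1 < (w : Int) then
    let ch := PySem.List.pyGetD row p.1 ' '
    if ch = '^' then
      p.2 * ((if 0 ≤ p.1 - 1 then g (p.1 - 1) else 0) +
             (if p.1 + 1 < (w : Int) then g (p.1 + 1) else 0))
    else if ch = 'S' ∨ ch = '.' then p.2 * g p.1
    else 0
  else 0

lemma pvPhi_modify (w : Nat) (d : PySem.Dict Int Int) (g : Int → Int) (c k : Int)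
    (hc : 0 ≤ c) (hcw : c < (w : Int)) :
    pvPhi w (d.modify c 0 (· + k)) g = pvPhi w d g + k * g c := by
  unfold pvPhi
  have hterm : ∀ c' ∈ Finset.range w,
      (d.modify c 0 (· + k)).getD (c' : Int) 0 * g (c' : Int)
        = d.getD (c' : Int) 0 * g (c' : Int)
          + (if c' = c.toNat then k * g (c' : Int) else 0) := by
    intro c' _
    rw [PySem.Dict.getD_modify]
    by_cases h : (c' : Int) = c
    · have h2 : c' = c.toNat := by omega
      rw [if_pos h, if_pos h2, ← h]; ring
    · have h2 : ¬ c' = c.toNat := by omega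
      rw [if_neg h, if_neg h2]; ring
  rw [Finset.sum_congr rfl hterm, Finset.sum_add_distrib, Finset.sum_ite_eq']
  have hmem : c.toNat ∈ Finset.range w := by
    simp only [Finset.mem_range]; omega
  have hcast : ((c.toNat : Int)) = c := by omega
  simp [hmem, hcast]

lemma pvInv_modify (w : Nat) (d : PySem.Dict Int Int) (c : Int) (d0 : Int) (f : Int → Int)
    (hinv : pvInv w d) (hc : 0 ≤ c) (hcw : c < (w : Int)) :
    pvInv w (d.modify c d0 f) := by
  obtain ⟨hnd, hmem⟩ := hinv
  constructor
  · rw [PySem.Dict.keys_modify]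
    exact PySem.Dict.nodup_keys_insert _ _ _ hnd
  · intro x hx
    rw [PySem.Dict.keys_modify] at hx
    rcases (PySem.Dict.mem_keys_insert _ _ _ _).1 hx with h | h
    · exact h ▸ ⟨hc, hcw⟩
    · exact hmem x h

lemma pvInv_step (row : List Char) (w : Nat) (d : PySem.Dict Int Int) (p : Int × Int) (k0 : Int)
    (hp : p.2 = k0) (hinv : pvInv w d) : pvInv w (pvStepA row (w : Int) d p) := by
  unfold pvStepA
  obtain ⟨c, k⟩ := p
  have hm : ∀ (d' : PySem.Dict Int Int) (c' : Int), pvInv w d' → 0 ≤ c' → c' < (w : Int) →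
      pvInv w (d'.modify c' 0 (· + k)) := fun d' c' h h0 h1 => pvInv_modify w d' c' 0 _ h h0 h1
  dsimp only
  split_ifs with hg h1 h2 h3 h4 h5 <;>
    first
      | exact hinv
      | exact hm _ _ hinv (by omega) (by omega)
      | exact hm _ _ (hm _ _ hinv (by omega) (by omega)) (by omega) (by omega)

lemma pvInv_foldl (row : List Char) (w : Nat) (ps : List (Int × Int)) :
    ∀ d : PySem.Dict Int Int, pvInv w d →
      pvInv w (ps.foldl (pvStepA row (w : Int)) d) := by
  induction ps with
  | nil => intro d h; exact h
  | cons p rest ih =>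
    intro d h
    exact ih _ (pvInv_step row w d p p.2 rfl h)

lemma pvPhi_step (row : List Char) (w : Nat) (g : Int → Int) (d : PySem.Dict Int Int)
    (p : Int × Int) :
    pvPhi w (pvStepA row (w : Int) d p) g = pvPhi w d g + pvContrib row w g p := by
  unfold pvStepA pvContrib
  obtain ⟨c, k⟩ := p
  dsimp only
  split_ifs with hg h1 h2 h3 h4 h5 <;>
    (try rw [pvPhi_modify w _ g (c + 1) k (by omega) (by omega)]) <;>
    (try rw [pvPhi_modify w _ g (c - 1) k (by omega) (by omega)]) <;>
    (try rw [pvPhi_modify w d g c k (by omega) (by omega)]) <;>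
    ring

lemma pvPhi_foldl (row : List Char) (w : Nat) (g : Int → Int) (ps : List (Int × Int)) :
    ∀ d : PySem.Dict Int Int,
      pvPhi w (ps.foldl (pvStepA row (w : Int)) d) g
        = pvPhi w d g + (ps.map (pvContrib row w g)).sum := by
  induction ps with
  | nil => intro d; simp
  | cons p rest ih =>
    intro d
    simp only [List.foldl_cons, List.map_cons, List.sum_cons]
    rw [ih, pvPhi_step]; ring

lemma pvPhi_empty (w : Nat) (g : Int → Int) :
    pvPhi w (PySem.Dict.empty : PySem.Dict Int Int) g = 0 := by
  unfold pvPhi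
  simp [PySem.Dict.getD_empty]

-- sum over items = sum over all columns, for an in-range Nodup frontier
lemma pvSum_items (w : Nat) (d : PySem.Dict Int Int) (G : Int → Int) (hinv : pvInv w d) :
    (d.items.map (fun p => p.2 * G p.1)).sum = pvPhi w d G := by
  obtain ⟨hnd, hmem⟩ := hinv
  rw [PySem.Dict.items_eq_map_keys d hnd 0, List.map_map]
  have h1 : (List.map ((fun p => p.2 * G p.1) ∘ fun k => (k, d.getD k 0)) d.keys).sum
      = d.keys.toFinset.sum (fun k => d.getD k 0 * G k) :=
    (List.sum_toFinset _ hnd).symm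
  rw [h1]
  unfold pvPhi
  have hinj : Set.InjOn (fun c : Nat => (c : Int)) ↑(Finset.range w) := by
    intro a _ b _ h; exact Nat.cast_inj.mp h
  rw [← Finset.sum_image (f := fun k : Int => d.getD k 0 * G k) hinj]
  apply Finset.sum_subset
  · intro x hx
    rw [List.mem_toFinset] at hx
    obtain ⟨h0, h1⟩ := hmem x hx
    rw [Finset.mem_image]
    exact ⟨x.toNat, by simp only [Finset.mem_range]; omega, by omega⟩
  · intro x _ hx
    rw [List.mem_toFinset] at hx
    have : d.contains x = false := by
      rcases Bool.eq_false_or_eq_true (d.contains x) with h | h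
      · exact absurd ((PySem.Dict.contains_iff_mem_keys d x).1 h) hx
      · exact h
    rw [PySem.Dict.getD_of_not_contains d 0 this, zero_mul]

-- one item's contribution equals its weight times B's new ways row at its column
lemma pvContrib_eq (row : List Char) (w : Nat) (ways : List Int) (c k : Int)
    (hlen : w ≤ row.length) (h0 : 0 ≤ c) (hw : c < (w : Int)) :
    pvContrib row w (pvG ways) (c, k) = k * pvG (pvRowB row w ways) c := by
  have hcn : c.toNat < w := by omega
  unfold pvContrib pvG pvRowB
  simp only [h0, hw, and_self, if_true]
  rw [PySem.List.getD_map_range _ w c.toNat 0 hcn]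
  have hch : PySem.List.pyGetD row c ' ' = row.getD c.toNat ' ' := by
    rw [PySem.List.pyGetD_eq_getElem row ' ' h0 (by omega)]
    exact (List.getD_eq_getElem row ' ' (by omega)).symm
  rw [hch]
  by_cases hch1 : row.getD c.toNat ' ' = '^'
  · rw [if_pos hch1, if_pos hch1]
    have hA1 : (if 0 ≤ c - 1 then ways.getD (c - 1).toNat 0 else 0)
        = (if 1 ≤ c.toNat then ways.getD (c.toNat - 1) 0 else 0) := by
      by_cases h : 0 ≤ c - 1
      · rw [if_pos h, if_pos (show 1 ≤ c.toNat by omega),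
          show (c - 1).toNat = c.toNat - 1 from by omega]
      · rw [if_neg h, if_neg (show ¬ 1 ≤ c.toNat by omega)]
    have hA2 : (if c + 1 < (w : Int) then ways.getD (c + 1).toNat 0 else 0)
        = (if c.toNat + 1 < w then ways.getD (c.toNat + 1) 0 else 0) := by
      by_cases h : c + 1 < (w : Int)
      · rw [if_pos h, if_pos (show c.toNat + 1 < w by omega),
          show (c + 1).toNat = c.toNat + 1 from by omega]
      · rw [if_neg h, if_neg (show ¬ c.toNat + 1 < w by omega)]
    rw [hA1, hA2]
  · rw [if_neg hch1, if_neg hch1]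
    by_cases hch2 : row.getD c.toNat ' ' = 'S' ∨ row.getD c.toNat ' ' = '.'
    · rw [if_pos hch2, if_pos hch2]
    · rw [if_neg hch2, if_neg hch2, mul_zero]

-- Main invariant: A's remaining run against B's backward table
lemma pvMain (w : Nat) (rows : List (List Char)) :
    ∀ d : PySem.Dict Int Int, (∀ row ∈ rows, w ≤ row.length) → pvInv w d →
      ((pvRowsA rows (w : Int) d).values).sum
        = (d.items.map (fun p => p.2 * pvG (pvW w rows) p.1)).sum := by
  induction rows with
  | nil =>
    intro d _ hinv
    unfold pvRowsA pvW
    simp only [List.foldr_nil]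
    have hvals : d.values = d.items.map (·.2) := rfl
    rw [hvals]
    have : ∀ p ∈ d.items, p.2 * pvG (List.replicate w 1) p.1 = p.2 := by
      intro p hp
      have hk : p.1 ∈ d.keys := by
        have : d.keys = d.items.map (·.1) := rfl
        rw [this]; exact List.mem_map_of_mem hp
      obtain ⟨h0, h1⟩ := hinv.2 p.1 hk
      unfold pvG
      rw [List.getD_replicate 1 (by omega), mul_one]
    rw [List.map_congr_left this]
  | cons row rest ih =>
    intro d hlen hinv
    unfold pvRowsA
    by_cases hd : d.items = []
    · simp only [hd, if_true]
      have hvals : d.values = d.items.map (·.2) := rfl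
      rw [hvals, hd]; simp
    · simp only [hd, if_false]
      have hstepinv : pvInv w (d.items.foldl (pvStepA row (w : Int)) PySem.Dict.empty) :=
        pvInv_foldl row w d.items PySem.Dict.empty
          ⟨by rw [PySem.Dict.keys_empty]; exact List.nodup_nil, by
            intro k hk; rw [PySem.Dict.keys_empty] at hk; exact absurd hk (List.not_mem_nil)⟩
      rw [ih _ (fun r hr => hlen r (List.mem_cons_of_mem _ hr)) hstepinv]
      rw [pvSum_items w _ _ hstepinv, pvPhi_foldl, pvPhi_empty, zero_add]
      have hW : pvW w (row :: rest) = pvRowB row w (pvW w rest) := rfl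
      rw [hW]
      refine congrArg List.sum (List.map_congr_left ?_)
      intro p hp
      have hk : p.1 ∈ d.keys := by
        have : d.keys = d.items.map (·.1) := rfl
        rw [this]; exact List.mem_map_of_mem hp
      obtain ⟨h0, h1⟩ := hinv.2 p.1 hk
      have := pvContrib_eq row w (pvW w rest) p.1 p.2
        (hlen row (List.mem_cons_self)) h0 h1
      calc pvContrib row w (pvG (pvW w rest)) p
          = pvContrib row w (pvG (pvW w rest)) (p.1, p.2) := by rfl
        _ = p.2 * pvG (pvRowB row w (pvW w rest)) p.1 := this

-- pvInitA in terms of pvFindS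
lemma pvInitA_eq (row : List Char) : ∀ c : Nat,
    pvInitA row (c : Int)
      = match pvFindS row c with
        | none => PySem.Dict.empty
        | some i => PySem.Dict.empty.insert (i : Int) 1 := by
  induction row with
  | nil => intro c; rfl
  | cons ch rest ih =>
    intro c
    unfold pvInitA pvFindS
    by_cases h : ch = 'S'
    · simp [h]
    · simp only [h, if_false]
      have : (c : Int) + 1 = ((c + 1 : Nat) : Int) := by push_cast; ring
      rw [this, ih (c + 1)]

lemma pvFindS_lt (row : List Char) : ∀ c i : Nat,
    pvFindS row c = some i → c ≤ i ∧ i < c + row.length := by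
  induction row with
  | nil => intro c i h; exact absurd h (by simp [pvFindS])
  | cons ch rest ih =>
    intro c i h
    unfold pvFindS at h
    by_cases hc : ch = 'S'
    · simp only [hc, if_true, Option.some.injEq] at h
      simp [← h]
    · simp only [hc, if_false] at h
      have := ih (c + 1) i h
      simp only [List.length_cons]
      omega

lemma pvFindS_mem (row : List Char) : ∀ c i : Nat,
    pvFindS row c = some i → 'S' ∈ row := by
  induction row with
  | nil => intro c i h; exact absurd h (by simp [pvFindS])
  | cons ch rest ih =>
    intro c i h
    unfold pvFindS at h
    by_cases hc : ch = 'S'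
    · rw [← hc]; exact List.mem_cons_self
    · simp only [hc, if_false] at h
      exact List.mem_cons_of_mem _ (ih (c + 1) i h)

-- ===== VERDICT (by name: the statement is the Claim_ definition above) =====
theorem solve_part2_quantum_spec : Claim_equal_solve_part2_quantum := by
  intro input_str _ hpre
  unfold Spec_solve_part2_quantum solve_part2_quantum solve_part2_quantum_alt
  unfold Pre_solve_part2_quantum at hpre
  dsimp only at hpre ⊢
  generalize hG : PySem.Chars.splitOn (PySem.Chars.strip input_str.toList) ['
'] = grid at hpre ⊢
  cases grid with
  | nil => rfl
  | cons g0 gr =>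
    simp only [List.headD_cons] at hpre ⊢
    rw [show (0 : Int) = ((0 : Nat) : Int) from rfl, pvInitA_eq g0 0]
    cases hfind : pvFindS g0 0 with
    | none =>
      dsimp only
      unfold pvRowsA
      rw [if_pos (show (PySem.Dict.empty : PySem.Dict Int Int).items = [] from rfl)]
      rfl
    | some i =>
      dsimp only
      have hlen : ∀ row ∈ g0 :: gr, g0.length ≤ row.length := by
        rcases hpre with h | h
        · exact absurd (pvFindS_mem g0 0 i hfind) h
        · exact h
      have hi : i < g0.length := by
        have := pvFindS_lt g0 0 i hfind
        omega
      have hcontains : (PySem.Dict.empty : PySem.Dict Int Int).contains (i : Int) = false :=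
        PySem.Dict.contains_empty _
      have hinv : pvInv g0.length (PySem.Dict.empty.insert (i : Int) 1) := by
        constructor
        · exact PySem.Dict.nodup_keys_insert _ _ _
            (by rw [PySem.Dict.keys_empty]; exact List.nodup_nil)
        · intro k hk
          rcases (PySem.Dict.mem_keys_insert _ _ _ _).1 hk with h | h
          · subst h; constructor <;> omega
          · rw [PySem.Dict.keys_empty] at h; exact absurd h (List.not_mem_nil)
      rw [pvMain g0.length (g0 :: gr) _ hlen hinv]
      rw [PySem.Dict.items_insert_of_not_contains _ _ hcontains]
      have hitems : (PySem.Dict.empty : PySem.Dict Int Int).items ++ [((i : Int), (1 : Int))]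
          = [((i : Int), (1 : Int))] := rfl
      rw [hitems]
      simp only [List.map_cons, List.map_nil, List.sum_cons, List.sum_nil, add_zero, one_mul]
      rw [List.foldl_reverse]
      have hpg : pvG (pvW g0.length (g0 :: gr)) (i : Int)
          = (pvW g0.length (g0 :: gr)).getD i 0 := by
        unfold pvG
        rw [Int.toNat_natCast]
      rw [hpg]
      rfl
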